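-- pv_equiv track=rewrite | github.com/mklemmingen/ALEE | ALEE_Agent/modules.py | _format_obstacles_for_expert
-- ===== SOURCE A (Python) =====
-- from typing import Dict, Any, Optional, List
--
-- def _format_obstacles_for_expert(params: Dict[str, Any]) -> str:
--     """Format obstacle parameters for obstacle expert"""
--     obstacles = []
--
--     # Root text obstacles
--     if params.get('p_root_text_obstacle_passive') == 'Enthalten':
--         obstacles.append('Grundtext: Passiv')
--     if params.get('p_root_text_obstacle_negation') == 'Enthalten':
--         obstacles.append('Grundtext: Negation')
--     if params.get('p_root_text_obstacle_complex_np') == 'Enthalten':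
--         obstacles.append('Grundtext: Komplexe Nominalphrasen')
--
--     # Item obstacles
--     for i in range(1, 9):
--         if params.get(f'p_item_{i}_obstacle_passive') == 'Enthalten':
--             obstacles.append(f'Item {i}: Passiv')
--         if params.get(f'p_item_{i}_obstacle_negation') == 'Enthalten':
--             obstacles.append(f'Item {i}: Negation')
--         if params.get(f'p_item_{i}_obstacle_complex_np') == 'Enthalten':
--             obstacles.append(f'Item {i}: Komplexe NP')
--
--     # Instruction obstacles
--     if params.get('p_instruction_obstacle_passive') == 'Enthalten':
--         obstacles.append('Anweisung: Passiv')
--     if params.get('p_instruction_obstacle_complex_np') == 'Enthalten':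
--         obstacles.append('Anweisung: Komplexe NP')
--
--     return '; '.join(obstacles) if obstacles else 'Keine sprachlichen Hindernisse'
-- ===== SOURCE B (Python) =====
-- def _build_obstacle_rank():
--     index = {}
--     rank = 0
--     for kind, label in [('passive', 'Passiv'), ('negation', 'Negation'),
--                         ('complex_np', 'Komplexe Nominalphrasen')]:
--         index['p_root_text_obstacle_' + kind] = (rank, 'Grundtext: ' + label)
--         rank += 1
--     for i in range(1, 9):
--         for kind, label in [('passive', 'Passiv'), ('negation', 'Negation'),
--                             ('complex_np', 'Komplexe NP')]:
--             index[f'p_item_{i}_obstacle_{kind}'] = (rank, f'Item {i}: {label}')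
--             rank += 1
--     for kind, label in [('passive', 'Passiv'), ('complex_np', 'Komplexe NP')]:
--         index['p_instruction_obstacle_' + kind] = (rank, 'Anweisung: ' + label)
--         rank += 1
--     return index
--
--
-- _OBSTACLE_RANK = _build_obstacle_rank()
--
--
-- def _format_obstacles_for_expert(params):
--     """Scan the given params once, mapping each recognised obstacle key through a
--     precomputed key -> (rank, label) index, then sort the hits by rank."""
--     hits = []
--     for key, value in params.items():
--         if value == 'Enthalten':
--             rl = _OBSTACLE_RANK.get(key)
--             if rl is not None:
--                 hits.append(rl)
--     hits.sort(key=lambda rl: rl[0])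
--     if not hits:
--         return 'Keine sprachlichen Hindernisse'
--     return '; '.join(label for _, label in hits)
-- ===== Notes on version B (the rewrite author's own statement) =====
-- stated objective: alternative
-- what changed: Instead of probing 27 fixed keys against the dict in order, B scans the dict's own entries once, maps each key through a precomputed key->(rank,label) index, and sorts the hits by rank before joining.
import Mathlib
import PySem

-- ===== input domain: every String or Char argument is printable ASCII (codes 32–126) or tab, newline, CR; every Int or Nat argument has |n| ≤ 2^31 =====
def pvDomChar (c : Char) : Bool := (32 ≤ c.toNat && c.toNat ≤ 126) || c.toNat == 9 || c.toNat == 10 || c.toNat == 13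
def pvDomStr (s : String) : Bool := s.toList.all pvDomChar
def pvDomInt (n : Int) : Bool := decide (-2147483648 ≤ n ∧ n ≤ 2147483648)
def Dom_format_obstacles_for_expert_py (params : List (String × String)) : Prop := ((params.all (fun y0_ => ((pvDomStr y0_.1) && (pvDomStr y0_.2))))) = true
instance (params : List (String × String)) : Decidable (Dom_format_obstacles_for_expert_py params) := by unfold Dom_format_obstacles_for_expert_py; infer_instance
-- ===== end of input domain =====

-- B inverts the traversal: instead of probing 27 fixed keys against the dict, it scans the
-- dict's own entries once through a precomputed key→(rank,label) index and sorts the hits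
-- by rank (objective: alternative algorithm, same cost on these small dicts).

-- params.get(k): first-match lookup in the association list (dict in insertion order)
def pvGetParam (params : List (String × String)) (k : String) : Option String :=
  (params.find? (fun p => p.1 == k)).map (·.2)

-- ===== PORT A =====
def format_obstacles_for_expert_py (params : List (String × String)) : String :=
  let obstacles : List String := []
  -- Root text obstacles
  let obstacles := if pvGetParam params "p_root_text_obstacle_passive" = some "Enthalten" then obstacles ++ ["Grundtext: Passiv"] else obstacles
  let obstacles := if pvGetParam params "p_root_text_obstacle_negation" = some "Enthalten" then obstacles ++ ["Grundtext: Negation"] else obstacles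
  let obstacles := if pvGetParam params "p_root_text_obstacle_complex_np" = some "Enthalten" then obstacles ++ ["Grundtext: Komplexe Nominalphrasen"] else obstacles
  -- Item obstacles
  let obstacles := (PySem.List.pyRange 1 9 1).foldl (fun obstacles i =>
    let obstacles := if pvGetParam params ("p_item_" ++ PySem.Int.toStr i ++ "_obstacle_passive") = some "Enthalten" then obstacles ++ ["Item " ++ PySem.Int.toStr i ++ ": Passiv"] else obstacles
    let obstacles := if pvGetParam params ("p_item_" ++ PySem.Int.toStr i ++ "_obstacle_negation") = some "Enthalten" then obstacles ++ ["Item " ++ PySem.Int.toStr i ++ ": Negation"] else obstacles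
    let obstacles := if pvGetParam params ("p_item_" ++ PySem.Int.toStr i ++ "_obstacle_complex_np") = some "Enthalten" then obstacles ++ ["Item " ++ PySem.Int.toStr i ++ ": Komplexe NP"] else obstacles
    obstacles) obstacles
  -- Instruction obstacles
  let obstacles := if pvGetParam params "p_instruction_obstacle_passive" = some "Enthalten" then obstacles ++ ["Anweisung: Passiv"] else obstacles
  let obstacles := if pvGetParam params "p_instruction_obstacle_complex_np" = some "Enthalten" then obstacles ++ ["Anweisung: Komplexe NP"] else obstacles
  if obstacles = [] then "Keine sprachlichen Hindernisse" else PySem.Str.join "; " obstacles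

-- ===== PORT B =====
-- _build_obstacle_rank(): the index dict built by the three counting loops; every inserted
-- key is fresh, so dict insertion is appending to the association list; the rank counter is
-- threaded as the second component of the fold state.
def pvBuildObstacleRank : List (String × Int × String) :=
  let st : List (String × Int × String) × Int := ([], 0)
  let st := [("passive", "Passiv"), ("negation", "Negation"), ("complex_np", "Komplexe Nominalphrasen")].foldl
    (fun st p => (st.1 ++ [("p_root_text_obstacle_" ++ p.1, st.2, "Grundtext: " ++ p.2)], st.2 + 1)) st
  let st := (PySem.List.pyRange 1 9 1).foldl (fun st i =>
    [("passive", "Passiv"), ("negation", "Negation"), ("complex_np", "Komplexe NP")].foldl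
      (fun st p => (st.1 ++ [("p_item_" ++ PySem.Int.toStr i ++ "_obstacle_" ++ p.1, st.2, "Item " ++ PySem.Int.toStr i ++ ": " ++ p.2)], st.2 + 1)) st) st
  let st := [("passive", "Passiv"), ("complex_np", "Komplexe NP")].foldl
    (fun st p => (st.1 ++ [("p_instruction_obstacle_" ++ p.1, st.2, "Anweisung: " ++ p.2)], st.2 + 1)) st
  st.1

-- _OBSTACLE_RANK (module-level constant)
def pvObstacleRank : List (String × Int × String) := pvBuildObstacleRank

-- _OBSTACLE_RANK.get(key)
def pvRankGet (k : String) : Option (Int × String) :=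
  (pvObstacleRank.find? (fun p => p.1 == k)).map (·.2)

-- params.items(): the distinct-key entries in insertion order (first occurrence), i.e. the
-- dict the association list denotes under the first-match lookup convention
def pvItems (params : List (String × String)) : List (String × String) :=
  params.foldl (fun acc p => if acc.any (fun q => q.1 == p.1) then acc else acc ++ [p]) []

def format_obstacles_for_expert_py_alt (params : List (String × String)) : String :=
  let hits : List (Int × String) := (pvItems params).foldl (fun hits p =>
    if p.2 = "Enthalten" then
      match pvRankGet p.1 with
      | some rl => hits ++ [rl]
      | none => hits
    else hits) []
  let hits := PySem.List.sorted hits (fun rl => rl.1)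
  if hits = [] then "Keine sprachlichen Hindernisse"
  else PySem.Str.join "; " (hits.map (fun rl => rl.2))

-- ===== PRECONDITION & SPEC =====
def Spec_format_obstacles_for_expert_py (params : List (String × String)) (out : String) : Prop := out = format_obstacles_for_expert_py_alt params
instance (params : List (String × String)) (out : String) : Decidable (Spec_format_obstacles_for_expert_py params out) := by unfold Spec_format_obstacles_for_expert_py; infer_instance

-- ===== CLAIM =====
def Claim_equal_format_obstacles_for_expert_py : Prop := ∀ (params : List (String × String)), Dom_format_obstacles_for_expert_py params → Spec_format_obstacles_for_expert_py params (format_obstacles_for_expert_py params)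

-- ===== LEMMAS AND PROOFS =====

-- the index as a literal table (the value of pvBuildObstacleRank)
def pvT : List (String × Int × String) :=
  [("p_root_text_obstacle_passive", 0, "Grundtext: Passiv"),
   ("p_root_text_obstacle_negation", 1, "Grundtext: Negation"),
   ("p_root_text_obstacle_complex_np", 2, "Grundtext: Komplexe Nominalphrasen"),
   ("p_item_1_obstacle_passive", 3, "Item 1: Passiv"),
   ("p_item_1_obstacle_negation", 4, "Item 1: Negation"),
   ("p_item_1_obstacle_complex_np", 5, "Item 1: Komplexe NP"),
   ("p_item_2_obstacle_passive", 6, "Item 2: Passiv"),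
   ("p_item_2_obstacle_negation", 7, "Item 2: Negation"),
   ("p_item_2_obstacle_complex_np", 8, "Item 2: Komplexe NP"),
   ("p_item_3_obstacle_passive", 9, "Item 3: Passiv"),
   ("p_item_3_obstacle_negation", 10, "Item 3: Negation"),
   ("p_item_3_obstacle_complex_np", 11, "Item 3: Komplexe NP"),
   ("p_item_4_obstacle_passive", 12, "Item 4: Passiv"),
   ("p_item_4_obstacle_negation", 13, "Item 4: Negation"),
   ("p_item_4_obstacle_complex_np", 14, "Item 4: Komplexe NP"),
   ("p_item_5_obstacle_passive", 15, "Item 5: Passiv"),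
   ("p_item_5_obstacle_negation", 16, "Item 5: Negation"),
   ("p_item_5_obstacle_complex_np", 17, "Item 5: Komplexe NP"),
   ("p_item_6_obstacle_passive", 18, "Item 6: Passiv"),
   ("p_item_6_obstacle_negation", 19, "Item 6: Negation"),
   ("p_item_6_obstacle_complex_np", 20, "Item 6: Komplexe NP"),
   ("p_item_7_obstacle_passive", 21, "Item 7: Passiv"),
   ("p_item_7_obstacle_negation", 22, "Item 7: Negation"),
   ("p_item_7_obstacle_complex_np", 23, "Item 7: Komplexe NP"),
   ("p_item_8_obstacle_passive", 24, "Item 8: Passiv"),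
   ("p_item_8_obstacle_negation", 25, "Item 8: Negation"),
   ("p_item_8_obstacle_complex_np", 26, "Item 8: Komplexe NP"),
   ("p_instruction_obstacle_passive", 27, "Anweisung: Passiv"),
   ("p_instruction_obstacle_complex_np", 28, "Anweisung: Komplexe NP")]

theorem pvObstacleRank_eq : pvObstacleRank = pvT := by decide

-- B's filterMap view of the hits loop
def pvG (p : String × String) : Option (Int × String) :=
  if p.2 = "Enthalten" then pvRankGet p.1 else none

-- A's selection from the table, as (rank,label) pairs in table order
def pvAPairs (params : List (String × String)) : List (Int × String) :=
  pvT.filterMap (fun e => if pvGetParam params e.1 = some "Enthalten" then some e.2 else none)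

theorem pv_hits_eq (l : List (String × String)) (acc : List (Int × String)) :
    l.foldl (fun hits p =>
      if p.2 = "Enthalten" then
        match pvRankGet p.1 with
        | some rl => hits ++ [rl]
        | none => hits
      else hits) acc = acc ++ l.filterMap pvG := by
  induction l generalizing acc with
  | nil => simp
  | cons p t ih =>
    simp only [List.foldl_cons, List.filterMap_cons]
    by_cases h : p.2 = "Enthalten"
    · simp only [h, pvG]
      cases hr : pvRankGet p.1 with
      | none => simp [pvG, ih]
      | some rl => simp [pvG, ih]
    · simp [h, pvG, ih]

-- first-match find? in a list with distinct keys IS membership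
theorem pv_find?_key_iff {β : Type} (l : List (String × β)) (hnd : (l.map Prod.fst).Nodup)
    (k : String) (x : β) :
    l.find? (fun q => q.1 == k) = some (k, x) ↔ (k, x) ∈ l := by
  induction l with
  | nil => simp
  | cons a t ih =>
    simp only [List.map_cons, List.nodup_cons, List.mem_map] at hnd
    by_cases h : a.1 = k
    · have hk : ∀ y ∈ t, y.1 ≠ k := by
        intro y hy he; exact hnd.1 ⟨y, hy, by rw [he, h]⟩
      constructor
      · intro hf
        simp only [List.find?_cons, h, beq_self_eq_true] at hf
        simp only [Option.some.injEq] at hf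
        simp [← hf]
      · intro hm
        rcases List.mem_cons.mp hm with he | hmt
        · simp [← he]
        · exact absurd rfl (hk _ hmt)
    · have : (a.1 == k) = false := by simp [h]
      rw [List.find?_cons, this]
      rw [ih hnd.2]
      constructor
      · exact fun hm => List.mem_cons_of_mem _ hm
      · intro hm
        rcases List.mem_cons.mp hm with he | hmt
        · exact absurd (congrArg Prod.fst he).symm h
        · exact hmt

theorem pv_get_iff {β : Type} (l : List (String × β)) (k : String) (v : β) :
    (l.find? (fun p => p.1 == k)).map (·.2) = some v ↔ l.find? (fun q => q.1 == k) = some (k, v) := by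
  cases hf : l.find? (fun p => p.1 == k) with
  | none => simp
  | some q =>
    have hq : (q.1 == k) = true := by simpa using List.find?_some hf
    have hk : q.1 = k := by simpa using hq
    simp only [Option.map_some, Option.some.injEq]
    constructor
    · intro hv; rw [← hv, ← hk]
    · intro he; rw [he]

theorem pv_mem_items_go (l : List (String × String)) :
    ∀ acc, ∀ p, p ∈ l.foldl (fun acc p => if acc.any (fun q => q.1 == p.1) then acc else acc ++ [p]) acc ↔
      p ∈ acc ∨ ((∀ q ∈ acc, q.1 ≠ p.1) ∧ l.find? (fun q => q.1 == p.1) = some p) := by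
  induction l with
  | nil => intro acc p; simp
  | cons x t ih =>
    intro acc p
    simp only [List.foldl_cons]
    by_cases hx : acc.any (fun q => q.1 == x.1) = true
    · rw [if_pos hx, ih acc p]
      obtain ⟨w, hw, hwb⟩ := List.any_eq_true.mp hx
      have hwx : w.1 = x.1 := by simpa using hwb
      by_cases hxp : x.1 = p.1
      · have h1 : ¬(∀ q ∈ acc, q.1 ≠ p.1) := fun hall => hall w hw (hwx.trans hxp)
        constructor <;> rintro (hp | ⟨hall, _⟩) <;>
          first | exact Or.inl hp | exact absurd hall h1
      · rw [List.find?_cons_of_neg (by simpa using hxp)]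
    · rw [if_neg hx, ih (acc ++ [x]) p]
      have hfresh : ∀ q ∈ acc, ¬ q.1 = x.1 := by
        intro q hq he
        exact hx (List.any_eq_true.mpr ⟨q, hq, by simp [he]⟩)
      by_cases hxp : x.1 = p.1
      · rw [List.find?_cons_of_pos (by simpa using hxp)]
        have hall : ∀ q ∈ acc, q.1 ≠ p.1 := fun q hq => hxp ▸ hfresh q hq
        constructor
        · rintro (hp | ⟨hall2, hf⟩)
          · rcases List.mem_append.mp hp with hp | hp
            · exact Or.inl hp
            · exact Or.inr ⟨hall, by simp_all⟩
          · exact absurd hxp (hall2 x (List.mem_append.mpr (Or.inr (by simp))))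
        · rintro (hp | ⟨_, hf⟩)
          · exact Or.inl (List.mem_append.mpr (Or.inl hp))
          · exact Or.inl (List.mem_append.mpr (Or.inr (by simp [(Option.some.inj hf).symm])))
      · rw [List.find?_cons_of_neg (by simpa using hxp)]
        have hpx : p ≠ x := fun he => hxp (by rw [he])
        constructor
        · rintro (hp | ⟨hall, hf⟩)
          · rcases List.mem_append.mp hp with hp | hp
            · exact Or.inl hp
            · exact absurd (List.mem_singleton.mp hp) hpx
          · exact Or.inr ⟨fun q hq => hall q (List.mem_append.mpr (Or.inl hq)), hf⟩
        · rintro (hp | ⟨hall, hf⟩)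
          · exact Or.inl (List.mem_append.mpr (Or.inl hp))
          · refine Or.inr ⟨fun q hq => ?_, hf⟩
            rcases List.mem_append.mp hq with hq | hq
            · exact hall q hq
            · rw [List.mem_singleton.mp hq]; exact fun he => hxp he

theorem pv_mem_items (params : List (String × String)) (p : String × String) :
    p ∈ pvItems params ↔ params.find? (fun q => q.1 == p.1) = some p := by
  have := pv_mem_items_go params [] p
  simpa [pvItems] using this

theorem pv_items_keys_nodup_go (l : List (String × String)) :
    ∀ acc : List (String × String), (acc.map Prod.fst).Nodup →
      ((l.foldl (fun acc p => if acc.any (fun q => q.1 == p.1) then acc else acc ++ [p]) acc).map Prod.fst).Nodup := by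
  induction l with
  | nil => intro acc h; simpa using h
  | cons x t ih =>
    intro acc h
    simp only [List.foldl_cons]
    by_cases hx : acc.any (fun q => q.1 == x.1) = true
    · rw [if_pos hx]; exact ih acc h
    · rw [if_neg hx]
      refine ih (acc ++ [x]) ?_
      have hfresh : ∀ q ∈ acc, ¬ q.1 = x.1 := by
        intro q hq he
        exact hx (List.any_eq_true.mpr ⟨q, hq, by simp [he]⟩)
      simp only [List.map_append, List.map_cons, List.map_nil]
      rw [List.nodup_append]
      refine ⟨h, by simp, ?_⟩
      intro a ha b hb
      rcases List.mem_map.mp ha with ⟨q, hq, hqa⟩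
      rw [List.mem_singleton] at hb
      rw [← hqa, hb]
      exact hfresh q hq

theorem pv_items_keys_nodup (params : List (String × String)) : ((pvItems params).map Prod.fst).Nodup := by
  simpa [pvItems] using pv_items_keys_nodup_go params [] (by simp)

theorem pv_rankGet_iff (k : String) (x : Int × String) :
    pvRankGet k = some x ↔ (k, x) ∈ pvT := by
  unfold pvRankGet
  rw [pvObstacleRank_eq, pv_get_iff,
    pv_find?_key_iff pvT (by decide) k x]

-- the rank/label pair determines the key in pvT
theorem pv_eq_fst_of_nodup_snd {α β : Type} (l : List (α × β)) (h : (l.map Prod.snd).Nodup)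
    {k₁ k₂ : α} {x : β} (h₁ : (k₁, x) ∈ l) (h₂ : (k₂, x) ∈ l) : k₁ = k₂ := by
  induction l with
  | nil => cases h₁
  | cons a t ih =>
    simp only [List.map_cons, List.nodup_cons] at h
    rcases List.mem_cons.mp h₁ with e₁ | m₁ <;> rcases List.mem_cons.mp h₂ with e₂ | m₂
    · exact congrArg Prod.fst (e₁.trans e₂.symm)
    · exact absurd (List.mem_map.mpr ⟨(k₂, x), m₂, by rw [← e₁]⟩) h.1
    · exact absurd (List.mem_map.mpr ⟨(k₁, x), m₁, by rw [← e₂]⟩) h.1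
    · exact ih h.2 m₁ m₂

theorem pv_key_of_val {k₁ k₂ : String} {x : Int × String} (h₁ : (k₁, x) ∈ pvT) (h₂ : (k₂, x) ∈ pvT) : k₁ = k₂ :=
  pv_eq_fst_of_nodup_snd pvT (by decide) h₁ h₂

theorem pv_mem_H_iff (params : List (String × String)) (x : Int × String) :
    x ∈ (pvItems params).filterMap pvG ↔ x ∈ pvAPairs params := by
  constructor
  · intro hx
    rcases List.mem_filterMap.mp hx with ⟨p, hp, hgp⟩
    unfold pvG at hgp
    split_ifs at hgp with h2
    · have hT : (p.1, x) ∈ pvT := (pv_rankGet_iff p.1 x).mp hgp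
      have hfind : params.find? (fun q => q.1 == p.1) = some (p.1, "Enthalten") := by
        have := (pv_mem_items params p).mp hp
        rwa [show p = (p.1, "Enthalten") from by rw [← h2]] at this
      have hget : pvGetParam params p.1 = some "Enthalten" :=
        (pv_get_iff params p.1 "Enthalten").mpr hfind
      exact List.mem_filterMap.mpr ⟨(p.1, x), hT, by simp [hget]⟩
  · intro hx
    rcases List.mem_filterMap.mp hx with ⟨e, he, hfe⟩
    split_ifs at hfe with hc
    · have hex : e.2 = x := Option.some.inj hfe
      have hfind : params.find? (fun q => q.1 == e.1) = some (e.1, "Enthalten") :=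
        (pv_get_iff params e.1 "Enthalten").mp hc
      have hp : (e.1, "Enthalten") ∈ pvItems params :=
        (pv_mem_items params (e.1, "Enthalten")).mpr hfind
      have hTe : (e.1, e.2) ∈ pvT := by
        rwa [show (e.1, e.2) = e from rfl]
      have hrg : pvRankGet e.1 = some e.2 := (pv_rankGet_iff e.1 e.2).mpr hTe
      exact List.mem_filterMap.mpr ⟨(e.1, "Enthalten"), hp, by simp [pvG, hrg, hex]⟩

-- filterMap of an if-some-else-none selection is map-after-filter
theorem pv_filterMap_if {α β : Type} (l : List α) (c : α → Prop) [DecidablePred c] (f : α → β) :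
    l.filterMap (fun e => if c e then some (f e) else none) = (l.filter (fun e => decide (c e))).map f := by
  induction l with
  | nil => rfl
  | cons a t ih => by_cases h : c a <;> simp [h, ih]

theorem pv_APairs_pairwise (params : List (String × String)) :
    (pvAPairs params).Pairwise (fun a b => a.1 < b.1) := by
  have hsub : (pvAPairs params).Sublist (pvT.map Prod.snd) := by
    unfold pvAPairs
    rw [pv_filterMap_if]
    exact List.Sublist.map _ List.filter_sublist
  exact List.Pairwise.sublist hsub (by decide)

theorem pv_sorted_hits (params : List (String × String)) :
    PySem.List.sorted ((pvItems params).filterMap pvG) (fun rl => rl.1) = pvAPairs params := by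
  have hndA : (pvAPairs params).Nodup :=
    (pv_APairs_pairwise params).imp (fun {a b} h heq => by rw [heq] at h; exact lt_irrefl _ h)
  have hndH : ((pvItems params).filterMap pvG).Nodup := by
    refine List.Nodup.filterMap ?_ (List.Nodup.of_map Prod.fst (pv_items_keys_nodup params))
    intro p q b hbp hbq
    rw [Option.mem_def] at hbp hbq
    unfold pvG at hbp hbq
    split_ifs at hbp with h2
    · split_ifs at hbq with h3
      · have hTp : (p.1, b) ∈ pvT := (pv_rankGet_iff p.1 b).mp hbp
        have hTq : (q.1, b) ∈ pvT := (pv_rankGet_iff q.1 b).mp hbq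
        have h1 : p.1 = q.1 := pv_key_of_val hTp hTq
        exact Prod.ext h1 (h2.trans h3.symm)
  have hperm : (pvAPairs params).Perm ((pvItems params).filterMap pvG) :=
    (List.perm_ext_iff_of_nodup hndA hndH).mpr (fun a => ((pv_mem_H_iff params a).symm))
  exact PySem.List.sorted_eq_of_perm_of_pairwise_lt _ _ _ hperm (pv_APairs_pairwise params)

-- A's label list is the table selection's labels
theorem pv_flatMap_labels (params : List (String × String)) (t : List (String × Int × String)) :
    t.flatMap (fun e => if pvGetParam params e.1 = some "Enthalten" then [e.2.2] else []) =
      (t.filterMap (fun e => if pvGetParam params e.1 = some "Enthalten" then some e.2 else none)).map (·.2) := by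
  induction t with
  | nil => rfl
  | cons e t ih =>
    by_cases h : pvGetParam params e.1 = some "Enthalten" <;> simp [h, ih]

-- (if c then acc ++ [x] else acc) written as an append of a conditional segment
theorem pv_cond_append {c : Prop} [Decidable c] (acc : List String) (x : String) :
    (if c then acc ++ [x] else acc) = acc ++ (if c then [x] else []) := by
  split_ifs <;> simp

theorem pv_A_labels (params : List (String × String)) :
    format_obstacles_for_expert_py params =
      (if (pvAPairs params).map (·.2) = [] then "Keine sprachlichen Hindernisse"
       else PySem.Str.join "; " ((pvAPairs params).map (·.2))) := by
  unfold format_obstacles_for_expert_py pvAPairs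
  rw [← pv_flatMap_labels]
  simp only [pv_cond_append]
  simp only [List.append_assoc, List.nil_append]
  simp only [PySem.List.foldl_append_eq_flatMap]
  simp only [pvT, show PySem.List.pyRange 1 9 1 = [1, 2, 3, 4, 5, 6, 7, 8] from rfl,
    List.flatMap_cons, List.flatMap_nil, List.append_assoc, List.append_nil]
  rfl

-- ===== VERDICT =====
theorem format_obstacles_for_expert_py_spec : Claim_equal_format_obstacles_for_expert_py := by
  intro params _
  unfold Spec_format_obstacles_for_expert_py
  rw [pv_A_labels]
  unfold format_obstacles_for_expert_py_alt
  simp only [pv_hits_eq, List.nil_append, pv_sorted_hits]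
  simp [List.map_eq_nil_iff]
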